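-- pv_equiv track=rewrite | github.com/aurelienverbeke/projetprepa2a | Arborescence.py | possibilite_defausse
-- ===== SOURCE A (Python) =====
-- def possibilite_defausse(deplacementLateralPossible, deplacementDiagonalPossible, valeurCarteAttaqueLateral, valeurCarteAttaqueDiagonal, estCoupBas=False):
--     """
--     Renvoie toutes les defausses possibles
--
--     Parametres :
--         - deplacementLateralPossible (int) : nombre de déplacements lateraux possibles (ie nombre de cartes trefles)
--         - deplacementDiagonalPossible (int) : nombre de déplacements diagonaux possibles (ie nombre de cartes piques)
--         - valeurCarteAttaqueLateral (liste(int)) : la liste des valeurs des differentes cartes carreaux (attaques latérales)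
--         - valeurCarteAttaqueDiagonal (liste(int)) : la liste des valeurs des differentes cartes coeur (attaques diagonales)
--         - estCoupBas (bool) : True si il y a une réponse a un coup bas, False sinon
--
--     Renvoie une liste de la forme [(motif, valeur)] avec une valeur de 0 pour les cartes piques et trefles
--     """
--
--     possibiliteDefausse = [[]]
--
--     possibiliteDefausse = [x + [("T", 0)] * i for x in possibiliteDefausse for i in
--                            range(deplacementLateralPossible + 1)]
--     possibiliteDefausse = [x + [("P", 0)] * i for x in possibiliteDefausse for i in
--                            range(deplacementDiagonalPossible + 1)]
--
--     CarteAttaqueLateral = [("K", v) for v in list(sorted(valeurCarteAttaqueLateral))]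
--     possibiliteDefausse = [x + CarteAttaqueLateral[:i] for x in possibiliteDefausse for i in
--                            range(len(CarteAttaqueLateral) + 1)]
--     CarteAttaqueDiagonal = [("C", v) for v in list(sorted(valeurCarteAttaqueDiagonal))]
--     possibiliteDefausse = [x + CarteAttaqueDiagonal[:i] for x in possibiliteDefausse for i in
--                            range(len(CarteAttaqueDiagonal) + 1)]
--
--     if estCoupBas:
--         possibiliteDefausse = [x for x in possibiliteDefausse if len(x) == 2]
--     else:
--         possibiliteDefausse = [x for x in possibiliteDefausse if len(x) < 4]
--     return possibiliteDefausse
-- ===== SOURCE B (Python) =====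
-- def possibilite_defausse(deplacementLateralPossible, deplacementDiagonalPossible, valeurCarteAttaqueLateral, valeurCarteAttaqueDiagonal, estCoupBas=False):
--     """Same discard enumeration, but only combinations whose total length can
--     pass the final filter are ever generated (nested loops with pruned bounds,
--     in the same order as the Cartesian product)."""
--     bound = 2 if estCoupBas else 3
--     K = sorted(valeurCarteAttaqueLateral)
--     C = sorted(valeurCarteAttaqueDiagonal)
--     res = []
--     for i in range(min(deplacementLateralPossible, bound) + 1):
--         for j in range(min(deplacementDiagonalPossible, bound - i) + 1):
--             for k in range(min(len(K), bound - i - j) + 1):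
--                 for c in range(min(len(C), bound - i - j - k) + 1):
--                     if (not estCoupBas) or i + j + k + c == 2:
--                         res.append([("T", 0)] * i + [("P", 0)] * j
--                                    + [("K", v) for v in K[:k]]
--                                    + [("C", v) for v in C[:c]])
--     return res
-- ===== Notes on version B (the rewrite author's own statement) =====
-- stated objective: faster
-- what changed: B replaces A's build-the-full-Cartesian-product-then-filter-by-length with four nested loops whose ranges are pruned by the remaining length budget, so only combinations that can pass the final length filter are ever generated, in the same order.
import Mathlib
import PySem

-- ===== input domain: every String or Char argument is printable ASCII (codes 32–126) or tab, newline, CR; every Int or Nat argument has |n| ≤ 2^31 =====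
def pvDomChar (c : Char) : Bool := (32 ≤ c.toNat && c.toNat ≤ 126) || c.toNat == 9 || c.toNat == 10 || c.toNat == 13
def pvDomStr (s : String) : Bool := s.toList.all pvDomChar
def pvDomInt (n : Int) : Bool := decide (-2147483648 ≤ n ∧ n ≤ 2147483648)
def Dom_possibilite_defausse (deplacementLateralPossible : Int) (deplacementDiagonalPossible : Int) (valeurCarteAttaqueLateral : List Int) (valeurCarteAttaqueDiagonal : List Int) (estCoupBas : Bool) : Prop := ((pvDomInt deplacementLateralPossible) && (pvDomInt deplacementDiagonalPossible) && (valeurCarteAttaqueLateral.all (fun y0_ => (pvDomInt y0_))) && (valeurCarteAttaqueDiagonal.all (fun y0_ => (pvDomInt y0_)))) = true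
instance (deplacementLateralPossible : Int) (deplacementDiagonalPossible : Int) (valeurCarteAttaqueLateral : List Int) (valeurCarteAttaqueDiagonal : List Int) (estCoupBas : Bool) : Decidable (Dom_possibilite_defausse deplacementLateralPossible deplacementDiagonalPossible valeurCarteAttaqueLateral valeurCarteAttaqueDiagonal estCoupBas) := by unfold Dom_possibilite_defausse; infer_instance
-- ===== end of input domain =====

-- B replaces A's build-the-full-Cartesian-product-then-filter-by-length with nested loops
-- whose ranges are pruned by the remaining length budget (objective: faster — only
-- combinations that can pass the final length filter are ever generated, in the same order).

-- ===== PORT A =====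
def possibilite_defausse (deplacementLateralPossible : Int) (deplacementDiagonalPossible : Int) (valeurCarteAttaqueLateral : List Int) (valeurCarteAttaqueDiagonal : List Int) (estCoupBas : Bool) : List (List (String × Int)) :=
  let p0 : List (List (String × Int)) := [[]]
  let p1 := p0.flatMap (fun x => (PySem.List.pyRange 0 (deplacementLateralPossible + 1) 1).map
    (fun i => x ++ PySem.List.pyRepeat [(("T" : String), (0 : Int))] i))
  let p2 := p1.flatMap (fun x => (PySem.List.pyRange 0 (deplacementDiagonalPossible + 1) 1).map
    (fun i => x ++ PySem.List.pyRepeat [(("P" : String), (0 : Int))] i))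
  let carteAttaqueLateral := (PySem.List.sorted valeurCarteAttaqueLateral (fun v => v)).map (fun v => (("K" : String), v))
  let p3 := p2.flatMap (fun x => (PySem.List.pyRange 0 ((carteAttaqueLateral.length : Int) + 1) 1).map
    (fun i => x ++ PySem.List.slice carteAttaqueLateral none (some i)))
  let carteAttaqueDiagonal := (PySem.List.sorted valeurCarteAttaqueDiagonal (fun v => v)).map (fun v => (("C" : String), v))
  let p4 := p3.flatMap (fun x => (PySem.List.pyRange 0 ((carteAttaqueDiagonal.length : Int) + 1) 1).map
    (fun i => x ++ PySem.List.slice carteAttaqueDiagonal none (some i)))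
  if estCoupBas then p4.filter (fun x => x.length == 2)
  else p4.filter (fun x => decide (x.length < 4))

-- ===== PORT B =====
def possibilite_defausse_alt (deplacementLateralPossible : Int) (deplacementDiagonalPossible : Int) (valeurCarteAttaqueLateral : List Int) (valeurCarteAttaqueDiagonal : List Int) (estCoupBas : Bool) : List (List (String × Int)) :=
  let bound : Int := if estCoupBas then 2 else 3
  let sortedK := PySem.List.sorted valeurCarteAttaqueLateral (fun v => v)
  let sortedC := PySem.List.sorted valeurCarteAttaqueDiagonal (fun v => v)
  (PySem.List.pyRange 0 (min deplacementLateralPossible bound + 1) 1).flatMap (fun i =>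
    (PySem.List.pyRange 0 (min deplacementDiagonalPossible (bound - i) + 1) 1).flatMap (fun j =>
      (PySem.List.pyRange 0 (min (sortedK.length : Int) (bound - i - j) + 1) 1).flatMap (fun k =>
        (PySem.List.pyRange 0 (min (sortedC.length : Int) (bound - i - j - k) + 1) 1).flatMap (fun c =>
          if !estCoupBas || (i + j + k + c == 2) then
            [PySem.List.pyRepeat [(("T" : String), (0 : Int))] i ++
             PySem.List.pyRepeat [(("P" : String), (0 : Int))] j ++
             (PySem.List.slice sortedK none (some k)).map (fun v => (("K" : String), v)) ++
             (PySem.List.slice sortedC none (some c)).map (fun v => (("C" : String), v))]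
          else []))))

-- ===== PRECONDITION & SPEC =====
def Spec_possibilite_defausse (deplacementLateralPossible : Int) (deplacementDiagonalPossible : Int) (valeurCarteAttaqueLateral : List Int) (valeurCarteAttaqueDiagonal : List Int) (estCoupBas : Bool) (out : List (List (String × Int))) : Prop := out = possibilite_defausse_alt deplacementLateralPossible deplacementDiagonalPossible valeurCarteAttaqueLateral valeurCarteAttaqueDiagonal estCoupBas
instance (deplacementLateralPossible : Int) (deplacementDiagonalPossible : Int) (valeurCarteAttaqueLateral : List Int) (valeurCarteAttaqueDiagonal : List Int) (estCoupBas : Bool) (out : List (List (String × Int))) : Decidable (Spec_possibilite_defausse deplacementLateralPossible deplacementDiagonalPossible valeurCarteAttaqueLateral valeurCarteAttaqueDiagonal estCoupBas out) := by unfold Spec_possibilite_defausse; infer_instance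

-- ===== CLAIM (what is proved, stated in full; the proofs are below) =====
def Claim_equal_possibilite_defausse : Prop := ∀ (deplacementLateralPossible : Int) (deplacementDiagonalPossible : Int) (valeurCarteAttaqueLateral : List Int) (valeurCarteAttaqueDiagonal : List Int) (estCoupBas : Bool), Dom_possibilite_defausse deplacementLateralPossible deplacementDiagonalPossible valeurCarteAttaqueLateral valeurCarteAttaqueDiagonal estCoupBas → Spec_possibilite_defausse deplacementLateralPossible deplacementDiagonalPossible valeurCarteAttaqueLateral valeurCarteAttaqueDiagonal estCoupBas (possibilite_defausse deplacementLateralPossible deplacementDiagonalPossible valeurCarteAttaqueLateral valeurCarteAttaqueDiagonal estCoupBas)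

-- ===== LEMMAS AND PROOFS =====

-- a '[:b]' slice commutes with map (any bound): slice is a clamped take, and map preserves length
theorem pv_slice_map {α β : Type} (xs : List α) (f : α → β) (b : Int) :
    PySem.List.slice (xs.map f) none (some b) = (PySem.List.slice xs none (some b)).map f := by
  unfold PySem.List.slice
  simp

-- 'for x in l: if p(x): out.append(f(x))' as a flatMap of an if-singleton is filter-then-map
theorem pv_flatMap_ite_singleton {α β : Type} (p : α → Bool) (f : α → β) (l : List α) :
    (l.flatMap fun x => if p x then [f x] else []) = (l.filter p).map f := by
  induction l with
  | nil => rfl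
  | cons x t ih => by_cases h : p x <;> simp [h, ih]

-- dropping the tail of a 0-based range whose elements all map to []
theorem pv_flatMap_trunc {α : Type} (n bnd : Int) (f : Int → List α) (hbnd : 0 ≤ bnd)
    (h0 : ∀ i, bnd < i → f i = []) :
    (PySem.List.pyRange 0 (n + 1) 1).flatMap f
      = (PySem.List.pyRange 0 (min n bnd + 1) 1).flatMap f := by
  rcases le_or_gt n bnd with h | h
  · rw [min_eq_left h]
  · rw [min_eq_right h.le,
      PySem.List.pyRange_one_append 0 (bnd + 1) (n + 1) (by omega) (by omega),
      List.flatMap_append]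
    have h2 : (PySem.List.pyRange (bnd + 1) (n + 1) 1).flatMap f = [] :=
      List.flatMap_eq_nil_iff.mpr
        (fun i hi => h0 i (by have := PySem.List.mem_pyRange_one.mp hi; omega))
    rw [h2, List.append_nil]

-- dropping the tail of a 0-based range on which the filter can never hold
theorem pv_filter_trunc (m t : Int) (ht : 0 ≤ t) (p : Int → Bool)
    (hp : ∀ c, p c = true → c ≤ t) :
    (PySem.List.pyRange 0 (m + 1) 1).filter p
      = (PySem.List.pyRange 0 (min m t + 1) 1).filter p := by
  rcases le_or_gt m t with h | h
  · rw [min_eq_left h]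
  · rw [min_eq_right h.le,
      PySem.List.pyRange_one_append 0 (t + 1) (m + 1) (by omega) (by omega),
      List.filter_append]
    have h2 : (PySem.List.pyRange (t + 1) (m + 1) 1).filter p = [] :=
      List.filter_eq_nil_iff.mpr
        (fun c hc hpc => by
          have := PySem.List.mem_pyRange_one.mp hc
          have := hp c hpc
          omega)
    rw [h2, List.append_nil]

-- core: the filtered full Cartesian product equals the budget-pruned nested product
theorem pv_prune {α : Type} (na nb nc nd bnd : Int) (hbnd : 0 ≤ bnd)
    (p : Int → Int → Int → Int → Bool) (q : Int → Bool)
    (hq : ∀ t, q t = true → t ≤ bnd)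
    (hpq : ∀ i j k c, 0 ≤ i → 0 ≤ j → 0 ≤ k → k ≤ nc → 0 ≤ c → c ≤ nd →
      p i j k c = q (i + j + k + c))
    (mk : Int → Int → Int → Int → α) :
    ((PySem.List.pyRange 0 (na + 1) 1).flatMap fun i =>
      (PySem.List.pyRange 0 (nb + 1) 1).flatMap fun j =>
        (PySem.List.pyRange 0 (nc + 1) 1).flatMap fun k =>
          ((PySem.List.pyRange 0 (nd + 1) 1).filter fun c => p i j k c).map fun c => mk i j k c)
    = ((PySem.List.pyRange 0 (min na bnd + 1) 1).flatMap fun i =>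
      (PySem.List.pyRange 0 (min nb (bnd - i) + 1) 1).flatMap fun j =>
        (PySem.List.pyRange 0 (min nc (bnd - i - j) + 1) 1).flatMap fun k =>
          ((PySem.List.pyRange 0 (min nd (bnd - i - j - k) + 1) 1).filter fun c => q (i + j + k + c)).map
            fun c => mk i j k c) := by
  have hqnil : ∀ i j k, bnd < i + j + k →
      ((PySem.List.pyRange 0 (nd + 1) 1).filter fun c => q (i + j + k + c)) = [] := by
    intro i j k hs
    exact List.filter_eq_nil_iff.mpr (fun c hc hqc => by
      have := PySem.List.mem_pyRange_one.mp hc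
      have := hq _ hqc
      omega)
  calc
    ((PySem.List.pyRange 0 (na + 1) 1).flatMap fun i =>
      (PySem.List.pyRange 0 (nb + 1) 1).flatMap fun j =>
        (PySem.List.pyRange 0 (nc + 1) 1).flatMap fun k =>
          ((PySem.List.pyRange 0 (nd + 1) 1).filter fun c => p i j k c).map fun c => mk i j k c)
    _ = ((PySem.List.pyRange 0 (na + 1) 1).flatMap fun i =>
      (PySem.List.pyRange 0 (nb + 1) 1).flatMap fun j =>
        (PySem.List.pyRange 0 (nc + 1) 1).flatMap fun k =>
          ((PySem.List.pyRange 0 (nd + 1) 1).filter fun c => q (i + j + k + c)).map fun c => mk i j k c) := by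
      refine List.flatMap_congr fun i hi => List.flatMap_congr fun j hj => List.flatMap_congr fun k hk => ?_
      have hi' := PySem.List.mem_pyRange_one.mp hi
      have hj' := PySem.List.mem_pyRange_one.mp hj
      have hk' := PySem.List.mem_pyRange_one.mp hk
      have : ((PySem.List.pyRange 0 (nd + 1) 1).filter fun c => p i j k c)
          = ((PySem.List.pyRange 0 (nd + 1) 1).filter fun c => q (i + j + k + c)) := by
        refine List.filter_congr fun c hc => ?_
        have hc' := PySem.List.mem_pyRange_one.mp hc
        exact hpq i j k c (by omega) (by omega) (by omega) (by omega) (by omega) (by omega)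
      rw [this]
    _ = ((PySem.List.pyRange 0 (min na bnd + 1) 1).flatMap fun i =>
      (PySem.List.pyRange 0 (nb + 1) 1).flatMap fun j =>
        (PySem.List.pyRange 0 (nc + 1) 1).flatMap fun k =>
          ((PySem.List.pyRange 0 (nd + 1) 1).filter fun c => q (i + j + k + c)).map fun c => mk i j k c) := by
      refine pv_flatMap_trunc na bnd _ hbnd fun i hbig => ?_
      refine List.flatMap_eq_nil_iff.mpr fun j hj => List.flatMap_eq_nil_iff.mpr fun k hk => ?_
      have hj' := PySem.List.mem_pyRange_one.mp hj
      have hk' := PySem.List.mem_pyRange_one.mp hk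
      rw [hqnil i j k (by omega), List.map_nil]
    _ = ((PySem.List.pyRange 0 (min na bnd + 1) 1).flatMap fun i =>
      (PySem.List.pyRange 0 (min nb (bnd - i) + 1) 1).flatMap fun j =>
        (PySem.List.pyRange 0 (nc + 1) 1).flatMap fun k =>
          ((PySem.List.pyRange 0 (nd + 1) 1).filter fun c => q (i + j + k + c)).map fun c => mk i j k c) := by
      refine List.flatMap_congr fun i hi => ?_
      have hi' := PySem.List.mem_pyRange_one.mp hi
      have hile : i ≤ bnd := by have := min_le_right na bnd; omega
      refine pv_flatMap_trunc nb (bnd - i) _ (by omega) fun j hbig => ?_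
      refine List.flatMap_eq_nil_iff.mpr fun k hk => ?_
      have hk' := PySem.List.mem_pyRange_one.mp hk
      rw [hqnil i j k (by omega), List.map_nil]
    _ = ((PySem.List.pyRange 0 (min na bnd + 1) 1).flatMap fun i =>
      (PySem.List.pyRange 0 (min nb (bnd - i) + 1) 1).flatMap fun j =>
        (PySem.List.pyRange 0 (min nc (bnd - i - j) + 1) 1).flatMap fun k =>
          ((PySem.List.pyRange 0 (nd + 1) 1).filter fun c => q (i + j + k + c)).map fun c => mk i j k c) := by
      refine List.flatMap_congr fun i hi => ?_
      have hi' := PySem.List.mem_pyRange_one.mp hi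
      have hile : i ≤ bnd := by have := min_le_right na bnd; omega
      refine List.flatMap_congr fun j hj => ?_
      have hj' := PySem.List.mem_pyRange_one.mp hj
      have hjle : j ≤ bnd - i := by have := min_le_right nb (bnd - i); omega
      refine pv_flatMap_trunc nc (bnd - i - j) _ (by omega) fun k hbig => ?_
      rw [hqnil i j k (by omega), List.map_nil]
    _ = ((PySem.List.pyRange 0 (min na bnd + 1) 1).flatMap fun i =>
      (PySem.List.pyRange 0 (min nb (bnd - i) + 1) 1).flatMap fun j =>
        (PySem.List.pyRange 0 (min nc (bnd - i - j) + 1) 1).flatMap fun k =>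
          ((PySem.List.pyRange 0 (min nd (bnd - i - j - k) + 1) 1).filter fun c => q (i + j + k + c)).map
            fun c => mk i j k c) := by
      refine List.flatMap_congr fun i hi => ?_
      have hi' := PySem.List.mem_pyRange_one.mp hi
      have hile : i ≤ bnd := by have := min_le_right na bnd; omega
      refine List.flatMap_congr fun j hj => ?_
      have hj' := PySem.List.mem_pyRange_one.mp hj
      have hjle : j ≤ bnd - i := by have := min_le_right nb (bnd - i); omega
      refine List.flatMap_congr fun k hk => ?_
      have hk' := PySem.List.mem_pyRange_one.mp hk
      have hkle : k ≤ bnd - i - j := by have := min_le_right nc (bnd - i - j); omega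
      rw [pv_filter_trunc nd (bnd - i - j - k) (by omega) _
        (fun c hqc => by have := hq _ hqc; omega)]

theorem possibilite_defausse_spec : Claim_equal_possibilite_defausse := by
  intro L D vK vC b _
  unfold Spec_possibilite_defausse possibilite_defausse possibilite_defausse_alt
  cases b
  case false =>
    simp only [List.flatMap_cons, List.flatMap_nil, List.append_nil, List.nil_append,
      List.flatMap_map, List.flatMap_assoc, List.filter_flatMap, List.filter_map,
      Function.comp_def, List.length_map, PySem.List.length_sorted, pv_slice_map,
      List.append_assoc, Bool.not_false, Bool.true_or,
      if_true, Bool.false_eq_true, if_false,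
      ← List.map_eq_flatMap]
    rw [pv_prune L D (vK.length : Int) (vC.length : Int) 3 (by norm_num)
      (fun i j k c => decide (((fun i j k c =>
      PySem.List.pyRepeat [(("T" : String), (0 : Int))] i ++
        (PySem.List.pyRepeat [(("P" : String), (0 : Int))] j ++
          ((PySem.List.slice (PySem.List.sorted vK fun v => v) none (some k)).map (fun v => (("K" : String), v)) ++
            (PySem.List.slice (PySem.List.sorted vC fun v => v) none (some c)).map (fun v => (("C" : String), v))))) i j k c).length < 4))
      (fun t => decide (t < 4))
      (fun t ht => by have := of_decide_eq_true ht; omega)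
      (fun i j k c hi hj hk hknK hc hcnC => by
        beta_reduce
        rw [PySem.List.slice_to _ hk, PySem.List.slice_to _ hc]
        simp only [List.length_append, List.length_map, List.length_take,
          PySem.List.pyRepeat_singleton, List.length_replicate, PySem.List.length_sorted]
        rw [decide_eq_decide]
        omega)
      (fun i j k c =>
      PySem.List.pyRepeat [(("T" : String), (0 : Int))] i ++
        (PySem.List.pyRepeat [(("P" : String), (0 : Int))] j ++
          ((PySem.List.slice (PySem.List.sorted vK fun v => v) none (some k)).map (fun v => (("K" : String), v)) ++
            (PySem.List.slice (PySem.List.sorted vC fun v => v) none (some c)).map (fun v => (("C" : String), v)))))]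
    refine List.flatMap_congr fun i hi => List.flatMap_congr fun j hj =>
      List.flatMap_congr fun k hk => ?_
    have hi' := PySem.List.mem_pyRange_one.mp hi
    have hj' := PySem.List.mem_pyRange_one.mp hj
    have hk' := PySem.List.mem_pyRange_one.mp hk
    rw [List.filter_eq_self.mpr (fun c hc => by
      have hc' := PySem.List.mem_pyRange_one.mp hc
      exact decide_eq_true (by omega))]
  case true =>
    simp only [List.flatMap_cons, List.flatMap_nil, List.append_nil, List.nil_append,
      List.flatMap_map, List.flatMap_assoc, List.filter_flatMap, List.filter_map,
      Function.comp_def, List.length_map, PySem.List.length_sorted, pv_slice_map,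
      List.append_assoc, Bool.not_true, Bool.false_or,
      if_true, pv_flatMap_ite_singleton]
    rw [pv_prune L D (vK.length : Int) (vC.length : Int) 2 (by norm_num)
      (fun i j k c => ((fun i j k c =>
      PySem.List.pyRepeat [(("T" : String), (0 : Int))] i ++
        (PySem.List.pyRepeat [(("P" : String), (0 : Int))] j ++
          ((PySem.List.slice (PySem.List.sorted vK fun v => v) none (some k)).map (fun v => (("K" : String), v)) ++
            (PySem.List.slice (PySem.List.sorted vC fun v => v) none (some c)).map (fun v => (("C" : String), v))))) i j k c).length == 2)
      (fun t => t == 2)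
      (fun t ht => by have := eq_of_beq ht; omega)
      (fun i j k c hi hj hk hknK hc hcnC => by
        beta_reduce
        rw [PySem.List.slice_to _ hk, PySem.List.slice_to _ hc]
        simp only [List.length_append, List.length_map, List.length_take,
          PySem.List.pyRepeat_singleton, List.length_replicate, PySem.List.length_sorted]
        rw [Bool.eq_iff_iff]
        simp only [beq_iff_eq]
        omega)
      (fun i j k c =>
      PySem.List.pyRepeat [(("T" : String), (0 : Int))] i ++
        (PySem.List.pyRepeat [(("P" : String), (0 : Int))] j ++
          ((PySem.List.slice (PySem.List.sorted vK fun v => v) none (some k)).map (fun v => (("K" : String), v)) ++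
            (PySem.List.slice (PySem.List.sorted vC fun v => v) none (some c)).map (fun v => (("C" : String), v)))))]
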